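-- pv_equiv track=rewrite | github.com/iandioch/solutions | kattis/selfsimilarstrings/solution.py | self_similar
-- ===== SOURCE A (Python) =====
-- from collections import defaultdict
--
-- def self_similar(s, n):
--     d = defaultdict(int)
--     for i in range(len(s)-n+1):
--         t = s[i:i+n]
--         d[t] += 1
--
--
--     for i in range(len(s)-n+1):
--         t = s[i:i+n]
--         if d[t] == 1:
--             return False
--     return True
-- ===== SOURCE B (Python) =====
-- def self_similar(s, n):
--     run, prev = 0, None
--     for t in sorted(s[i:i+n] for i in range(len(s)-n+1)):
--         if run and t == prev:
--             run += 1
--         else: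
--             if run == 1:
--                 return False
--             prev, run = t, 1
--     return run != 1
-- ===== Notes on version B (the rewrite author's own statement) =====
-- stated objective: alternative
-- what changed: Replaces the two dictionary-counting passes with sort-then-scan: collect the length-n windows, sort them so equal windows become adjacent, and do one run-length scan rejecting any run of length 1.
import Mathlib
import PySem

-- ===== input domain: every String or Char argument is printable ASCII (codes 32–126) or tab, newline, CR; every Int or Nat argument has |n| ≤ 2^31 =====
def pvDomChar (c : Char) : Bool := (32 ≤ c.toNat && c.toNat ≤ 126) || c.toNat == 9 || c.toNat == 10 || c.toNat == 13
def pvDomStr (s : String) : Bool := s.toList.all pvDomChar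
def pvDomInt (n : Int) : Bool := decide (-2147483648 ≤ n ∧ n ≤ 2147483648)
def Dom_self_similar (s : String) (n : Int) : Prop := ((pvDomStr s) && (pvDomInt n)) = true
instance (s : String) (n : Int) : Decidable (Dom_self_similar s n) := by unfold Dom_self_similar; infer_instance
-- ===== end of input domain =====

-- B replaces A's dictionary counting by sort-then-scan over the windows (alternative algorithm, similar cost).

-- ===== PORT A =====
def self_similar (s : String) (n : Int) : Bool :=
  let r := PySem.List.pyRange 0 (PySem.Str.len s - n + 1) 1
  let d := r.foldl (fun d i => PySem.Dict.modify d (PySem.Str.slice s (some i) (some (i + n))) (0 : Int) (· + 1)) PySem.Dict.empty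
  !(r.any (fun i => PySem.Dict.getD d (PySem.Str.slice s (some i) (some (i + n))) (0 : Int) == 1))

-- ===== PORT B =====
-- loop body of B's run-length scan (state: Python's (prev, run); none = early `return False`)
def pvStep (acc : Option (Option String × Int)) (t : String) : Option (Option String × Int) :=
  match acc with
  | none => none
  | some (prev, run) =>
    if decide (run ≠ 0) && (some t == prev) then some (prev, run + 1)
    else if run == 1 then none else some (some t, 1)

def self_similar_alt (s : String) (n : Int) : Bool :=
  -- Python's sorted() ported as Mathlib's stable List.mergeSort under String ≤
  let subs := List.mergeSort
      ((PySem.List.pyRange 0 (PySem.Str.len s - n + 1) 1).map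
        (fun i => PySem.Str.slice s (some i) (some (i + n)))) (fun a b => decide (a ≤ b))
  match subs.foldl pvStep (some ((none : Option String), (0 : Int))) with
  | none => false
  | some (_, run) => run != 1

-- ===== PRECONDITION & SPEC =====
def Spec_self_similar (s : String) (n : Int) (out : Bool) : Prop := out = self_similar_alt s n
instance (s : String) (n : Int) (out : Bool) : Decidable (Spec_self_similar s n out) := by unfold Spec_self_similar; infer_instance

-- ===== CLAIM (what is proved, stated in full; the proofs are below) =====
def Claim_equal_self_similar : Prop := ∀ (s : String) (n : Int), Dom_self_similar s n → Spec_self_similar s n (self_similar s n)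

-- ===== LEMMAS AND PROOFS =====

theorem pv_foldl_none (l : List String) : l.foldl pvStep none = none := by
  induction l with
  | nil => rfl
  | cons t rest ih => simpa [pvStep] using ih

-- what the run-length scan computes on a ≤-sorted tail l, started on a run of `run` copies of p
theorem pv_scan (l : List String) (p : String) (run : Int)
    (hpw : l.Pairwise (· ≤ ·)) (hrun : 1 ≤ run) (hple : ∀ x ∈ l, p ≤ x) :
    ((match l.foldl pvStep (some (some p, run)) with
      | none => false
      | some (_, r) => r != 1) = true)
    ↔ (run + (l.count p : Int) ≠ 1 ∧ ∀ t ∈ l, t ≠ p → l.count t ≠ 1) := by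
  induction l generalizing p run with
  | nil =>
    simp only [List.foldl_nil, List.count_nil, List.not_mem_nil, bne_iff_ne, Nat.cast_zero]
    constructor
    · intro h
      exact ⟨by omega, by simp⟩
    · rintro ⟨h1, _⟩
      omega
  | cons t rest ih =>
    obtain ⟨hhead, hpw'⟩ := List.pairwise_cons.mp hpw
    rw [List.foldl_cons]
    by_cases htp : t = p
    · subst htp
      have hstep : pvStep (some (some t, run)) t = some (some t, run + 1) := by
        simp [pvStep]
        omega
      rw [hstep, ih t (run + 1) hpw' (by omega) hhead]
      have hc : ∀ u, u ≠ t → (t :: rest).count u = rest.count u := fun u hu => by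
        simp [Ne.symm hu]
      have hct : (t :: rest).count t = rest.count t + 1 := by simp
      constructor
      · rintro ⟨h1, h2⟩
        refine ⟨by rw [hct]; push_cast; omega, ?_⟩
        intro u hu hut
        rw [hc u hut]
        rcases List.mem_cons.mp hu with h | h
        · exact absurd h hut
        · exact h2 u h hut
      · rintro ⟨h1, h2⟩
        refine ⟨by rw [hct] at h1; push_cast at h1 ⊢; omega, ?_⟩
        intro u hu hut
        rw [← hc u hut]
        exact h2 u (List.mem_cons_of_mem t hu) hut
    · have hpt : p < t := lt_of_le_of_ne (hple t (List.mem_cons_self)) (Ne.symm htp)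
      have hnotin : p ∉ t :: rest := by
        intro hm
        rcases List.mem_cons.mp hm with h | h
        · exact htp h.symm
        · exact absurd (hhead p h) (not_le.mpr hpt)
      have hcp : (t :: rest).count p = 0 := List.count_eq_zero.mpr hnotin
      by_cases hrun1 : run = 1
      · have hstep : pvStep (some (some p, run)) t = none := by
          simp [pvStep, htp, hrun1]
        rw [hstep, pv_foldl_none]
        simp only [hcp]
        constructor
        · intro h
          exact absurd h (by simp)
        · rintro ⟨h1, _⟩
          exfalso
          apply h1
          push_cast
          omega
      · have hstep : pvStep (some (some p, run)) t = some (some t, 1) := by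
          simp [pvStep, htp, hrun1]
        rw [hstep, ih t 1 hpw' (by omega) hhead]
        have hgt : ∀ u ∈ rest, u ≠ p := by
          intro u hu h
          exact absurd (hhead u hu) (not_le.mpr (h ▸ hpt))
        have hc : ∀ u, u ≠ t → (t :: rest).count u = rest.count u := fun u hu => by
          simp [Ne.symm hu]
        have hct : (t :: rest).count t = rest.count t + 1 := by simp
        constructor
        · rintro ⟨h1, h2⟩
          refine ⟨by simp [hcp]; omega, ?_⟩
          intro u hu hup
          by_cases hut : u = t
          · subst hut
            rw [hct]
            omega
          · rw [hc u hut]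
            rcases List.mem_cons.mp hu with h | h
            · exact absurd h hut
            · exact h2 u h hut
        · rintro ⟨_, h2⟩
          have h3 := h2 t List.mem_cons_self htp
          rw [hct] at h3
          refine ⟨by omega, ?_⟩
          intro u hu hut
          rw [← hc u hut]
          refine h2 u (List.mem_cons_of_mem t hu) (hgt u hu)

-- Bool-level equality of the two ports, over a generalised index list r
theorem pv_main (r : List Int) (f : Int → String) :
    (!(r.any (fun i => PySem.Dict.getD
        (r.foldl (fun d i => PySem.Dict.modify d (f i) (0 : Int) (· + 1)) PySem.Dict.empty) (f i) (0 : Int) == 1)))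
    = (match (List.mergeSort (r.map f) (fun a b => decide (a ≤ b))).foldl pvStep
          (some ((none : Option String), (0 : Int))) with
       | none => false
       | some (_, run) => run != 1) := by
  set L := r.map f with hL
  set M := List.mergeSort L (fun a b => decide (a ≤ b)) with hM
  have hperm : M.Perm L := List.mergeSort_perm L _
  have hpw : M.Pairwise (· ≤ ·) :=
    (List.pairwise_mergeSort (le := fun (a b : String) => decide (a ≤ b))
      (fun a b c hab hbc => by
        simp only [decide_eq_true_eq] at hab hbc ⊢
        exact le_trans hab hbc)
      (fun a b => by simpa using le_total a b) L).imp (fun h => of_decide_eq_true h)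
  rw [Bool.eq_iff_iff]
  have hfold : r.foldl (fun d i => PySem.Dict.modify d (f i) (0 : Int) (· + 1)) PySem.Dict.empty
      = L.foldl (fun d x => PySem.Dict.modify d x 0 (· + 1)) PySem.Dict.empty := by
    rw [hL, List.foldl_map]
  have hgetD : ∀ t, (L.foldl (fun d x => PySem.Dict.modify d x 0 (· + 1)) PySem.Dict.empty).getD t 0
      = (L.count t : Int) := by
    intro t
    rw [PySem.Dict.getD_foldl_modify_add_one, PySem.Dict.getD_empty]
    omega
  have hA : (!(r.any (fun i => PySem.Dict.getD
        (r.foldl (fun d i => PySem.Dict.modify d (f i) (0 : Int) (· + 1)) PySem.Dict.empty) (f i) (0 : Int) == 1))) = true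
      ↔ (∀ t ∈ L, L.count t ≠ 1) := by
    simp only [hfold, hgetD, Bool.not_eq_true', List.any_eq_false, beq_iff_eq]
    constructor
    · intro h t ht
      obtain ⟨i, hir, rfl⟩ := List.mem_map.mp ht
      intro hc
      exact h i hir (by exact_mod_cast hc)
    · intro h i hir hc
      exact h (f i) (List.mem_map_of_mem hir) (by exact_mod_cast hc)
  have hB : ((match M.foldl pvStep (some ((none : Option String), (0 : Int))) with
       | none => false
       | some (_, run) => run != 1) = true)
      ↔ (∀ t ∈ M, M.count t ≠ 1) := by
    rcases hMc : M with _ | ⟨t, rest⟩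
    · simp
    · obtain ⟨hhead, hpw'⟩ := List.pairwise_cons.mp (hMc ▸ hpw)
      rw [List.foldl_cons]
      have hstep : pvStep (some ((none : Option String), (0 : Int))) t = some (some t, 1) := by
        simp [pvStep]
      rw [hstep, pv_scan rest t 1 hpw' (by omega) hhead]
      have hc : ∀ u, u ≠ t → (t :: rest).count u = rest.count u := fun u hu => by
        simp [Ne.symm hu]
      have hct : (t :: rest).count t = rest.count t + 1 := by simp
      constructor
      · rintro ⟨h1, h2⟩
        intro u hu
        by_cases hut : u = t
        · subst hut
          rw [hct]
          omega
        · rw [hc u hut]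
          rcases List.mem_cons.mp hu with h | h
          · exact absurd h hut
          · exact h2 u h hut
      · intro h
        refine ⟨?_, ?_⟩
        · have := h t List.mem_cons_self
          rw [hct] at this
          omega
        · intro u hu hut
          have := h u (List.mem_cons_of_mem t hu)
          rwa [hc u hut] at this
  rw [hA, hB]
  constructor
  · intro h t ht
    rw [hperm.count_eq]
    exact h t (hperm.mem_iff.mp ht)
  · intro h t ht
    rw [← hperm.count_eq]
    exact h t (hperm.mem_iff.mpr ht)

-- ===== VERDICT (by name: the statement is the Claim_ definition above) =====
theorem self_similar_spec : Claim_equal_self_similar := by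
  intro s n _
  unfold Spec_self_similar self_similar self_similar_alt
  exact pv_main (PySem.List.pyRange 0 (PySem.Str.len s - n + 1) 1)
    (fun i => PySem.Str.slice s (some i) (some (i + n)))
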